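-- pv_equiv track=rewrite | github.com/SebastianGimenez/Algoritmos-geneticos | Ejercicio1.py | getAcumulado
-- ===== SOURCE A (Python) =====
-- def getAcumulado(fitness):
--     acumulado = []
--     for n in range(10):
--         suma = 0
--         for i in range(n+1):
--             suma = suma + fitness[i]
--         acumulado.append(suma)
--     return acumulado
-- ===== SOURCE B (Python) =====
-- def getAcumulado(fitness):
--     acumulado = []
--     suma = 0
--     for i in range(10):
--         suma = suma + fitness[i]
--         acumulado.append(suma)
--     return acumulado
-- ===== Notes on version B (the rewrite author's own statement) =====
-- stated objective: simpler
-- what changed: Replaced the nested re-summation (for each n, re-sum fitness[0..n]) with a single pass maintaining a running sum appended each iteration.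
import Mathlib
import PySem

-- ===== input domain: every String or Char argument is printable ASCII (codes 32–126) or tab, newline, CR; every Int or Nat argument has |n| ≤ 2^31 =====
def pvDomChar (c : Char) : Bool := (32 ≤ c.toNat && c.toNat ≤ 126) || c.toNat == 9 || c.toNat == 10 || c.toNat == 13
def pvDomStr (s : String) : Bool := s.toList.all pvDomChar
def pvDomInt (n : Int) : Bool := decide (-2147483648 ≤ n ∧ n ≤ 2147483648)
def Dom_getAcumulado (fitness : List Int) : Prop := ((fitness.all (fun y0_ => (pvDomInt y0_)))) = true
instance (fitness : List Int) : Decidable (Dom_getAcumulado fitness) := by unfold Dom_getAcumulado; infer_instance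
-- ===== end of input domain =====

-- B replaces A's nested re-summation with one running-sum pass over the same fixed 10 iterations (simpler).

-- ===== PORT A =====
-- Port of A: outer loop over range(10); for each n, re-sum fitness[0..n] from scratch.
-- fitness[i] is ported as pyGetD (exact under Pre_, which puts every index in range).
def getAcumulado (fitness : List Int) : List Int :=
  (PySem.List.pyRange 0 10 1).foldl (fun acumulado n =>
    acumulado ++ [(PySem.List.pyRange 0 (n + 1) 1).foldl
      (fun suma i => suma + PySem.List.pyGetD fitness i 0) 0]) []

-- ===== PORT B =====
-- Port of B: one pass with state (suma, acumulado); each step adds fitness[i] and appends the running sum.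
def getAcumulado_alt (fitness : List Int) : List Int :=
  ((PySem.List.pyRange 0 10 1).foldl (fun (st : Int × List Int) i =>
    let suma := st.1 + PySem.List.pyGetD fitness i 0
    (suma, st.2 ++ [suma])) (0, [])).2

-- ===== PRECONDITION & SPEC =====
-- Pre_ excludes exactly the inputs where Python A raises IndexError: lists shorter than 10.
def Pre_getAcumulado (fitness : List Int) : Prop := 10 ≤ fitness.length
instance (fitness : List Int) : Decidable (Pre_getAcumulado fitness) := by unfold Pre_getAcumulado; infer_instance
def pvWitness_getAcumulado : List Int := [1, 2, 3, 4, 5, 6, 7, 8, 9, 10]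

def Spec_getAcumulado (fitness : List Int) (out : List Int) : Prop := out = getAcumulado_alt fitness
instance (fitness : List Int) (out : List Int) : Decidable (Spec_getAcumulado fitness out) := by unfold Spec_getAcumulado; infer_instance

-- ===== CLAIM (what is proved, stated in full; the proofs are below) =====
def Claim_equal_getAcumulado : Prop := ∀ (fitness : List Int), Dom_getAcumulado fitness → Pre_getAcumulado fitness → Spec_getAcumulado fitness (getAcumulado fitness)

-- ===== LEMMAS AND PROOFS =====

-- ===== VERDICT (by name: the statement is the Claim_ definition above) =====
theorem getAcumulado_spec : Claim_equal_getAcumulado := by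
  intro fitness _ _
  unfold Spec_getAcumulado getAcumulado getAcumulado_alt
  have h : PySem.List.pyRange 0 10 1 = [0,1,2,3,4,5,6,7,8,9] := by decide
  rw [h]
  simp [List.foldl]
  norm_num [PySem.List.pyRange_one_cons, PySem.List.pyRange_one_eq_nil, List.foldl]
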